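-- pv_equiv track=rewrite | github.com/audiomuze/tagminder | 12-release_type_normalizer.py | normalize_single_value_entry
-- ===== SOURCE A (Python) =====
-- from typing import Dict, List, Union
--
-- DELIMITER = '\\\\'
--
-- def normalize_single_value_entry(x: Union[str, None], mapping: Dict[str, str]) -> Union[str, None]:
--     """
--     Normalize a release type entry by splitting on delimiter, mapping single values,
--     deduplicating, and rejoining.
--
--     Args:
--         x: The release type string to normalize (can be None)
--         mapping: Dictionary mapping old single values to new values
--
--     Returns:
--         Normalized release type string or None
--     """
--     if x is None:
--         return None
--
--     if DELIMITER in x: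
--         # Split delimited values
--         items = x.split(DELIMITER)
--         normalized_items = []
--
--         for item in items:
--             stripped_item = item.strip()
--             # Apply mapping (case sensitive)
--             normalized = mapping.get(stripped_item, stripped_item)
--             normalized_items.append(normalized)
--
--         # Deduplicate while preserving order
--         final_normalized_items = []
--         seen = set()
--         for item in normalized_items:
--             if item not in seen:
--                 final_normalized_items.append(item)
--                 seen.add(item)
--
--         return DELIMITER.join(final_normalized_items)
--     else:
--         # Single value
--         stripped_x = x.strip() if x else x
--         return mapping.get(stripped_x, stripped_x)
-- ===== SOURCE B (Python) =====
-- DELIMITER = '\\\\'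
--
-- def normalize_single_value_entry(x, mapping):
--     if x is None:
--         return None
--
--     def dedup(vals):
--         # recursive dedup: keep the head, drop every later equal value by filtering
--         if not vals:
--             return []
--         head = vals[0]
--         return [head] + dedup([v for v in vals[1:] if v != head])
--
--     values = [mapping.get(t.strip(), t.strip()) for t in x.split(DELIMITER)]
--     return DELIMITER.join(dedup(values))
-- ===== Notes on version B (the rewrite author's own statement) =====
-- stated objective: alternative
-- what changed: Replaces A's two-branch control flow and its iterative seen-set dedup fold with a single always-split path whose dedup is a recursive filter (keep the head, recurse on the tail with all equal values filtered out), needing no auxiliary set.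
import Mathlib
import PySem

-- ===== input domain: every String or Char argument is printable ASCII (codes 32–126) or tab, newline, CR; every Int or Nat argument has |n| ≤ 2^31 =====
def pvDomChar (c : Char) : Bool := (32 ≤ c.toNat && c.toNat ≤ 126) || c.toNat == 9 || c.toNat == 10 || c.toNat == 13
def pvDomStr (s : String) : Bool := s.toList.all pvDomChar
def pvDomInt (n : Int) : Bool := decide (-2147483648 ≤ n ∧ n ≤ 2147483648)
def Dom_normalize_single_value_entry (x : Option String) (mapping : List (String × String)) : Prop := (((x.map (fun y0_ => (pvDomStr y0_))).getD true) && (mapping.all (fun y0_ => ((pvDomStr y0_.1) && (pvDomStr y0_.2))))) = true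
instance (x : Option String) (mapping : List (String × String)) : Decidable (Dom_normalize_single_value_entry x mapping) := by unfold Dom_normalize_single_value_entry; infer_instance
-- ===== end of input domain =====

-- B always splits (no delimiter branch) and deduplicates by a recursive keep-head /
-- filter-the-tail pass instead of A's iterative seen-set fold; same return value (objective: alternative).

-- Python's mapping.get(k, k) (duplicate keys in the list collapse to the last value, as in a Python dict)
def pvGetOrSelf (mapping : List (String × String)) (k : String) : String :=
  (PySem.Dict.ofList mapping).getD k k

-- ===== PORT A =====
def normalize_single_value_entry (x : Option String) (mapping : List (String × String)) : Option String :=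
  match x with
  | none => none
  | some s =>
    if PySem.Str.isIn "\\\\" s then
      -- items = x.split(DELIMITER) (sep nonempty, so split? is some)
      let items := (PySem.Str.split? s "\\\\").getD []
      -- first loop: map each stripped item through the mapping
      let normalized_items := items.foldl
        (fun acc item => acc ++ [pvGetOrSelf mapping (PySem.Str.strip item)]) []
      -- second loop: deduplicate preserving order, with a seen set
      let fin := normalized_items.foldl
        (fun (p : List String × PySem.Set String) item =>
          if item ∈ p.2 then p else (p.1 ++ [item], p.2.add item))
        ([], PySem.Set.ofList [])
      some (PySem.Str.join "\\\\" fin.1)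
    else
      -- stripped_x = x.strip() if x else x  (empty string is falsy)
      let stripped_x := if s = "" then s else PySem.Str.strip s
      some (pvGetOrSelf mapping stripped_x)

-- ===== PORT B =====
-- recursive dedup: keep the head, recurse on the tail with all equal values filtered out
def pvDedup : List String → List String
  | [] => []
  | h :: t => h :: pvDedup (t.filter (fun v => v ≠ h))
termination_by l => l.length
decreasing_by
  simp only [List.length_unattach]
  calc (List.filter _ t.attach).length ≤ t.attach.length := List.length_filter_le _ _
    _ = t.length := List.length_attach ..
    _ < t.length + 1 := Nat.lt_succ_self _

def normalize_single_value_entry_alt (x : Option String) (mapping : List (String × String)) : Option String :=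
  match x with
  | none => none
  | some s =>
    let values := ((PySem.Str.split? s "\\\\").getD []).map
      (fun t => pvGetOrSelf mapping (PySem.Str.strip t))
    some (PySem.Str.join "\\\\" (pvDedup values))

-- ===== PRECONDITION & SPEC =====
def Spec_normalize_single_value_entry (x : Option String) (mapping : List (String × String)) (out : Option String) : Prop := out = normalize_single_value_entry_alt x mapping
instance (x : Option String) (mapping : List (String × String)) (out : Option String) : Decidable (Spec_normalize_single_value_entry x mapping out) := by unfold Spec_normalize_single_value_entry; infer_instance

-- ===== CLAIM =====
def Claim_equal_normalize_single_value_entry : Prop := ∀ (x : Option String) (mapping : List (String × String)), Dom_normalize_single_value_entry x mapping → Spec_normalize_single_value_entry x mapping (normalize_single_value_entry x mapping)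

-- ===== LEMMAS AND PROOFS =====

-- unfolding equations for the well-founded pvDedup
theorem pvDedup_nil : pvDedup [] = [] := by rw [pvDedup.eq_def]
theorem pvDedup_cons (h : String) (t : List String) :
    pvDedup (h :: t) = h :: pvDedup (t.filter (fun v => v ≠ h)) := by rw [pvDedup.eq_def]

-- membership after Set.add
theorem pv_mem_add (s : PySem.Set String) (h v : String) :
    v ∈ PySem.Set.add s h ↔ v ∈ s ∨ v = h := by
  by_cases hm : h ∈ s
  · simp [hm]
    intro hv; subst hv; exact hm
  · simp

-- A's seen-set dedup fold equals B's recursive filter dedup (generalized over the accumulator).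
theorem pv_dedup_fold (l : List String) (acc : List String) (seen : PySem.Set String) :
    (l.foldl (fun (p : List String × PySem.Set String) item =>
        if item ∈ p.2 then p else (p.1 ++ [item], p.2.add item)) (acc, seen)).1
    = acc ++ pvDedup (l.filter (fun v => decide (¬ v ∈ seen))) := by
  induction l generalizing acc seen with
  | nil => simp [pvDedup_nil]
  | cons h t ih =>
    simp only [List.foldl_cons, List.filter_cons]
    by_cases hm : h ∈ seen
    · rw [if_pos hm]
      simp only [hm, not_true, decide_false]
      exact ih acc seen
    · rw [if_neg hm]
      simp only [hm, not_false_iff, decide_true, if_true]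
      rw [ih (acc ++ [h]) (seen.add h), pvDedup_cons]
      rw [List.filter_filter]
      have : ∀ v : String,
          ((fun v => decide (¬ v ∈ seen.add h)) v)
          = ((fun v => decide (v ≠ h)) v && (fun v => decide (¬ v ∈ seen)) v) := by
        intro v
        simp only [pv_mem_add seen h v]
        simp [Bool.and_comm, not_or]
      rw [List.filter_congr (fun v _ => this v)]
      simp

-- When sep is not an infix of l, splitOn's worker never splits.
theorem pv_go_no_sep (sep : List Char) :
    ∀ (fuel : Nat) (l cur : List Char) (acc : List (List Char)),
      ¬ sep <:+: l →
      PySem.Chars.splitOn.go sep fuel l cur acc = ((cur.reverse ++ l) :: acc).reverse := by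
  intro fuel
  induction fuel with
  | zero => intro l cur acc _; rfl
  | succ n ih =>
    intro l cur acc h
    cases l with
    | nil => simp [PySem.Chars.splitOn.go]
    | cons c rest =>
      have hpre : sep.isPrefixOf (c :: rest) = false := by
        cases hv : sep.isPrefixOf (c :: rest) with
        | false => rfl
        | true => exact absurd ((List.isPrefixOf_iff_prefix.mp hv).isInfix) h
      have hrest : ¬ sep <:+: rest := fun hi => h (hi.trans (List.suffix_cons c rest).isInfix)
      rw [PySem.Chars.splitOn.go, hpre]
      simp only [Bool.false_eq_true, if_false]
      rw [ih rest (c :: cur) acc hrest]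
      simp

-- split with a separator that does not occur returns the whole string.
theorem pv_splitOn_no_sep (s sep : List Char) (h : ¬ sep <:+: s) :
    PySem.Chars.splitOn s sep = [s] := by
  rw [PySem.Chars.splitOn, pv_go_no_sep sep _ s [] [] h]
  simp

theorem pv_split_no_sep (s : String) (h : PySem.Str.isIn "\\\\" s = false) :
    PySem.Str.split? s "\\\\" = some [s] := by
  have hinf : ¬ ("\\\\".toList) <:+: s.toList := by
    have := PySem.Chars.isIn_eq_false_iff ("\\\\".toList) s.toList
    simp only [← PySem.Str.isIn_eq] at this
    exact this.mp h
  rw [PySem.Str.split?, PySem.Chars.split?]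
  rw [if_neg (by decide)]
  rw [pv_splitOn_no_sep _ _ hinf]
  simp

theorem pv_strip_if_empty (s : String) :
    (if s = "" then s else PySem.Str.strip s) = PySem.Str.strip s := by
  split_ifs with h
  · subst h; rfl
  · rfl

-- ===== VERDICT =====
theorem normalize_single_value_entry_spec : Claim_equal_normalize_single_value_entry := by
  intro x mapping _
  unfold Spec_normalize_single_value_entry
  cases x with
  | none => rfl
  | some s =>
    unfold normalize_single_value_entry normalize_single_value_entry_alt
    dsimp only
    by_cases h : PySem.Str.isIn "\\\\" s = true
    · rw [if_pos h]
      rw [show ((PySem.Str.split? s "\\\\").getD []).foldl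
            (fun acc item => acc ++ [pvGetOrSelf mapping (PySem.Str.strip item)]) []
          = ((PySem.Str.split? s "\\\\").getD []).map
            (fun item => pvGetOrSelf mapping (PySem.Str.strip item)) from
        PySem.List.foldl_append_singleton_eq_map _ _ []]
      rw [pv_dedup_fold _ [] (PySem.Set.ofList [])]
      simp [PySem.Set.ofList]
    · have hf : PySem.Str.isIn "\\\\" s = false := by
        cases hv : PySem.Str.isIn "\\\\" s with
        | true => exact absurd hv h
        | false => rfl
      rw [if_neg h, pv_split_no_sep s hf]
      simp only [Option.getD_some, List.map_cons, List.map_nil]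
      rw [pv_strip_if_empty]
      rw [pvDedup_cons]
      simp [pvDedup_nil, PySem.Str.join, PySem.Chars.join_singleton]
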